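-- pv_equiv track=rewrite | github.com/ashudnsingh/CodeSignal | Graphs/Kingdom Roads/005 - namingRoads.py | namingRoads
-- ===== SOURCE A (Python) =====
-- from collections import defaultdict as dd
--
-- def namingRoads(roads):
--     cities = dd(set)
--     for c1, c2, r in roads:
--         cities[c1].add(r)
--         cities[c2].add(r)
--
--     for s in cities.values():
--         for v in s:
--             if v-1 in s or v+1 in s:
--                 return False
--
--     return True
-- ===== SOURCE B (Python) =====
-- def namingRoads(roads):
--     cities = {}
--     for c1, c2, r in roads:
--         cities.setdefault(c1, []).append(r)
--         cities.setdefault(c2, []).append(r)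
--     for lst in cities.values():
--         srt = sorted(lst)
--         for a, b in zip(srt, srt[1:]):
--             if b - a == 1:
--                 return False
--     return True
-- ===== Notes on version B (the rewrite author's own statement) =====
-- stated objective: alternative
-- what changed: Groups each city's road numbers into a list, sorts it and scans adjacent pairs for a difference of exactly 1, instead of keeping per-city sets and probing them for v-1/v+1 membership.
import Mathlib
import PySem

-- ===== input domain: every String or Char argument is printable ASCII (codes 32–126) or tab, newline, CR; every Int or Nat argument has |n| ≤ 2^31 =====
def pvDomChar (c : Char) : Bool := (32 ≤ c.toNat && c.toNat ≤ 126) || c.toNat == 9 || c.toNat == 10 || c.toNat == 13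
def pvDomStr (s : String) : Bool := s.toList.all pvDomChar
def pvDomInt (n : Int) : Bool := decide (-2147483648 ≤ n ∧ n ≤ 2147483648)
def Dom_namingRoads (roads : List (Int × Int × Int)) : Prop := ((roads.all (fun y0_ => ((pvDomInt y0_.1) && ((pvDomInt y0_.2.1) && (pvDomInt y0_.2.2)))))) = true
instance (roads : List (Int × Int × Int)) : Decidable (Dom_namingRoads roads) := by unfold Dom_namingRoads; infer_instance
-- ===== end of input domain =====

-- B groups each city's road numbers into a list, sorts it and scans adjacent pairs for
-- difference 1, instead of A's per-city sets probed for v-1/v+1 membership (alternative decomposition).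


-- ===== PORT A =====
-- cities = defaultdict(set); cities[c1].add(r); cities[c2].add(r);
-- then for each value set: if any v has v-1 or v+1 in the set, return False.
-- (the inner 'for v in s' iterates a Python set: the result is order-independent, ported as .any)
def namingRoads (roads : List (Int × Int × Int)) : Bool :=
  let cities : PySem.Dict Int (PySem.Set Int) :=
    roads.foldl (fun d t =>
      let d := d.modify t.1 PySem.Set.empty (fun s => PySem.Set.add s t.2.2)
      d.modify t.2.1 PySem.Set.empty (fun s => PySem.Set.add s t.2.2)) PySem.Dict.empty
  !(cities.values.any (fun s =>
      s.any (fun v => PySem.Set.contains s (v - 1) || PySem.Set.contains s (v + 1))))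

-- ===== PORT B =====
-- cities = {}; setdefault(c, []).append(r) for both endpoints;
-- then for each value list: sort it and scan adjacent pairs for difference exactly 1.
def namingRoads_alt (roads : List (Int × Int × Int)) : Bool :=
  let cities : PySem.Dict Int (List Int) :=
    roads.foldl (fun d t =>
      let d := d.modify t.1 [] (fun l => l ++ [t.2.2])
      d.modify t.2.1 [] (fun l => l ++ [t.2.2])) PySem.Dict.empty
  !(cities.values.any (fun l =>
      let srt := PySem.List.sorted l (fun x => x) false
      (srt.zip srt.tail).any (fun p => p.2 - p.1 == 1)))

-- ===== PRECONDITION & SPEC =====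
def Spec_namingRoads (roads : List (Int × Int × Int)) (out : Bool) : Prop := out = namingRoads_alt roads
instance (roads : List (Int × Int × Int)) (out : Bool) : Decidable (Spec_namingRoads roads out) := by unfold Spec_namingRoads; infer_instance

-- ===== CLAIM (what is proved, stated in full; the proofs are below) =====
def Claim_equal_namingRoads : Prop := ∀ (roads : List (Int × Int × Int)), Dom_namingRoads roads → Spec_namingRoads roads (namingRoads roads)

-- ===== LEMMAS AND PROOFS =====

-- The flat (city, road) pair list both loops effectively traverse.
def pvFlat (roads : List (Int × Int × Int)) : List (Int × Int) :=
  roads.flatMap (fun t => [(t.1, t.2.2), (t.2.1, t.2.2)])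

-- The double-modify fold over roads is the single-modify fold over the flat pair list.
theorem pvFold_flat {ν : Type} (dflt : ν) (f : Int → ν → ν)
    (roads : List (Int × Int × Int)) (d : PySem.Dict Int ν) :
    roads.foldl (fun d t =>
      let d := d.modify t.1 dflt (f t.2.2)
      d.modify t.2.1 dflt (f t.2.2)) d
    = (pvFlat roads).foldl (fun d p => d.modify p.1 dflt (f p.2)) d := by
  induction roads generalizing d with
  | nil => rfl
  | cons t rest ih => simp [pvFlat, List.flatMap_cons, ih]

-- Per-key value of the Set.add fold: the Set.update of the filtered road numbers.
theorem pvGetD_setFold (l : List (Int × Int)) (d : PySem.Dict Int (PySem.Set Int)) (c : Int) :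
    (l.foldl (fun d p => d.modify p.1 PySem.Set.empty (fun s => PySem.Set.add s p.2)) d).getD c PySem.Set.empty
    = PySem.Set.update (d.getD c PySem.Set.empty) ((l.filter (fun p => p.1 == c)).map (·.2)) := by
  induction l generalizing d with
  | nil => rfl
  | cons p rest ih =>
      simp only [List.foldl_cons, ih, List.filter_cons]
      by_cases h : p.1 = c
      · simp [h, PySem.Set.update]
      · simp [h, PySem.Dict.getD_modify, Ne.symm h]

theorem pvMem_sorted_zip {t : List Int} {p : Int × Int}
    (h : p ∈ t.zip t.tail) : p.1 ∈ t ∧ p.2 ∈ t := by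
  obtain ⟨h1, h2⟩ := List.of_mem_zip h
  exact ⟨h1, List.mem_of_mem_tail h2⟩

-- In a ≤-chain containing x and y with x < y there is an adjacent strictly increasing pair squeezed between them.
theorem pvChain_adj {t : List Int} (hp : t.Pairwise (· ≤ ·)) {x y : Int}
    (hx : x ∈ t) (hy : y ∈ t) (hxy : x < y) :
    ∃ p ∈ t.zip t.tail, p.1 < p.2 ∧ x ≤ p.1 ∧ p.2 ≤ y := by
  induction t with
  | nil => cases hx
  | cons c rest ih =>
      have hcle : ∀ z ∈ rest, c ≤ z := (List.pairwise_cons.mp hp).1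
      have hprest : rest.Pairwise (· ≤ ·) := (List.pairwise_cons.mp hp).2
      have hyrest : y ∈ rest := by
        rcases List.mem_cons.mp hy with rfl | h
        · rcases List.mem_cons.mp hx with rfl | h
          · exact absurd hxy (lt_irrefl x)
          · exact absurd hxy (not_lt.mpr (hcle _ h))
        · exact h
      rcases List.mem_cons.mp hx with rfl | hxrest
      · -- x = c
        obtain ⟨e, rest', rfl⟩ : ∃ e rest', rest = e :: rest' :=
          by cases rest with
             | nil => cases hyrest
             | cons e rest' => exact ⟨e, rest', rfl⟩
        by_cases hce : x < e
        · refine ⟨(x, e), ?_, hce, le_refl x, ?_⟩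
          · simp [List.zip]
          · rcases List.mem_cons.mp hyrest with rfl | h
            · exact le_refl y
            · exact (List.pairwise_cons.mp hprest).1 _ h
        · have hex : e = x := le_antisymm (not_lt.mp hce) (hcle e (List.mem_cons_self))
          have hxin : x ∈ e :: rest' := by rw [hex]; exact List.mem_cons_self
          obtain ⟨p, hpmem, hplt, hpx, hpy⟩ := ih hprest hxin hyrest
          exact ⟨p, by simpa using Or.inr hpmem, hplt, hpx, hpy⟩
      · obtain ⟨p, hpmem, hplt, hpx, hpy⟩ := ih hprest hxrest hyrest
        refine ⟨p, ?_, hplt, hpx, hpy⟩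
        cases rest with
        | nil => cases hpmem
        | cons e rest' => simpa using Or.inr hpmem
  
-- Core per-city lemma: A's set check equals B's sort-and-scan check.
theorem pvCheck_eq (rs : List Int) :
    ((PySem.Set.ofList rs).any (fun v =>
        PySem.Set.contains (PySem.Set.ofList rs) (v - 1) || PySem.Set.contains (PySem.Set.ofList rs) (v + 1)))
    = (let srt := PySem.List.sorted rs (fun x => x) false
       (srt.zip srt.tail).any (fun p => p.2 - p.1 == 1)) := by
  simp only []
  rw [Bool.eq_iff_iff]
  constructor
  · intro h
    obtain ⟨v, hv, hside⟩ := List.any_eq_true.mp h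
    have hv' : v ∈ rs := (PySem.Set.mem_ofList _ _).mp hv
    have key : ∃ w, w ∈ rs ∧ w + 1 ∈ rs := by
      rcases Bool.or_eq_true_iff.mp hside with h1 | h1
      · exact ⟨v - 1, by simpa using (PySem.Set.mem_ofList _ _).mp ((PySem.Set.contains_iff _ _).mp h1), by simpa using hv'⟩
      · exact ⟨v, hv', (PySem.Set.mem_ofList _ _).mp ((PySem.Set.contains_iff _ _).mp h1)⟩
    obtain ⟨w, hw, hw1⟩ := key
    have hsp : (PySem.List.sorted rs (fun x => x) false).Pairwise (· ≤ ·) :=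
      PySem.List.sorted_pairwise rs (fun x => x)
    have hwm : w ∈ PySem.List.sorted rs (fun x => x) false := (PySem.List.mem_sorted _ _ _ _).mpr hw
    have hw1m : w + 1 ∈ PySem.List.sorted rs (fun x => x) false := (PySem.List.mem_sorted _ _ _ _).mpr hw1
    obtain ⟨p, hpmem, hplt, hpx, hpy⟩ := pvChain_adj hsp hwm hw1m (by omega)
    refine List.any_eq_true.mpr ⟨p, hpmem, ?_⟩
    simp only [beq_iff_eq]; omega
  · intro h
    obtain ⟨p, hpmem, hpd⟩ := List.any_eq_true.mp h
    have hd : p.2 - p.1 = 1 := by simpa using hpd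
    obtain ⟨h1, h2⟩ := pvMem_sorted_zip hpmem
    have h1' : p.1 ∈ rs := (PySem.List.mem_sorted _ _ _ _).mp h1
    have h2' : p.2 ∈ rs := (PySem.List.mem_sorted _ _ _ _).mp h2
    refine List.any_eq_true.mpr ⟨p.2, (PySem.Set.mem_ofList _ _).mpr h2', ?_⟩
    apply Bool.or_eq_true_iff.mpr; left
    apply (PySem.Set.contains_iff _ _).mpr
    apply (PySem.Set.mem_ofList _ _).mpr
    have : p.2 - 1 = p.1 := by omega
    rw [this]; exact h1'

-- ===== VERDICT (by name: the statement is the Claim_ definition above) =====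
theorem namingRoads_spec : Claim_equal_namingRoads := by
  intro roads _
  unfold Spec_namingRoads namingRoads namingRoads_alt
  rw [pvFold_flat PySem.Set.empty (fun r s => PySem.Set.add s r) roads PySem.Dict.empty,
      pvFold_flat ([] : List Int) (fun r l => l ++ [r]) roads PySem.Dict.empty]
  simp only []
  have hndA : (List.foldl (fun d p => d.modify p.1 PySem.Set.empty fun s => s.add p.2)
      PySem.Dict.empty (pvFlat roads)).keys.Nodup :=
    PySem.Dict.nodup_keys_foldl_modify_key (pvFlat roads) (fun p => p.1)
      PySem.Set.empty (fun _ p s => PySem.Set.add s p.2) PySem.Dict.empty (by simp)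
  have hndB : (List.foldl (fun d p => d.modify p.1 [] fun l => l ++ [p.2])
      PySem.Dict.empty (pvFlat roads)).keys.Nodup :=
    PySem.Dict.nodup_keys_foldl_modify_key (pvFlat roads) (fun p => p.1)
      ([] : List Int) (fun _ p l => l ++ [p.2]) PySem.Dict.empty (by simp)
  have hkA : (List.foldl (fun d p => d.modify p.1 PySem.Set.empty fun s => s.add p.2)
      PySem.Dict.empty (pvFlat roads)).keys = PySem.Set.update [] ((pvFlat roads).map (fun p => p.1)) :=
    PySem.Dict.keys_foldl_modify_key (pvFlat roads) (fun p => p.1)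
      PySem.Set.empty (fun _ p s => PySem.Set.add s p.2) PySem.Dict.empty
  have hkB : (List.foldl (fun d p => d.modify p.1 [] fun l => l ++ [p.2])
      PySem.Dict.empty (pvFlat roads)).keys = PySem.Set.update [] ((pvFlat roads).map (fun p => p.1)) :=
    PySem.Dict.keys_foldl_modify_key (pvFlat roads) (fun p => p.1)
      ([] : List Int) (fun _ p l => l ++ [p.2]) PySem.Dict.empty
  rw [PySem.Dict.values_eq_map_keys _ hndA PySem.Set.empty,
      PySem.Dict.values_eq_map_keys _ hndB ([] : List Int),
      hkA, hkB, List.any_map, List.any_map]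
  congr 1
  congr 1
  funext c
  simp only [Function.comp]
  rw [pvGetD_setFold, PySem.Dict.getD_foldl_modify_append]
  simp only [PySem.Dict.getD_empty]
  exact pvCheck_eq _
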